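-- pv_equiv track=rewrite | github.com/eriksylvan/AdventOfCode2019 | day_08.py | buildLayerImageMatrix
-- ===== SOURCE A (Python) =====
-- def buildLayerImageMatrix(imgStr, width, hight):
--     '''
--     Returns a matrix representing th image, dimensions: layer x hight width
--     NOT USED IN SOLUTION
--     '''
--     layers = len(imgStr) // (width * hight)
--     img = [[[-1 for x in range(width)] for y in range(hight)]
--            for z in range(layers)]
--     for l in range(layers):
--         for h in range(hight):
--             for w in range(width):
--                 pos = (l * width * hight) + (h * width) + w
--                 img[l][h][w] = int(imgStr[pos])
--     return img
-- ===== SOURCE B (Python) =====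
-- def buildLayerImageMatrix(imgStr, width, hight):
--     layers = len(imgStr) // (width * hight)
--     img, layer, row = [], [], []
--     for c in imgStr:
--         if len(img) >= layers:
--             break
--         row.append(int(c))
--         if len(row) == width:
--             layer.append(row)
--             row = []
--             if len(layer) == hight:
--                 img.append(layer)
--                 layer = []
--     return img
-- ===== Notes on version B (the rewrite author's own statement) =====
-- stated objective: alternative
-- what changed: Replaces the preallocated -1 matrix and triple loop with global index arithmetic by a single streaming pass over the string that converts each character once and groups digits into rows and rows into layers with accumulators, stopping when enough layers are built.
-- outside the precondition, e.g. on buildLayerImageMatrix('1', -1, -1): A returns [[]], B returns []; on buildLayerImageMatrix('x', -1, -1): A returns [[]], B raises ValueError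
import Mathlib
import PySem

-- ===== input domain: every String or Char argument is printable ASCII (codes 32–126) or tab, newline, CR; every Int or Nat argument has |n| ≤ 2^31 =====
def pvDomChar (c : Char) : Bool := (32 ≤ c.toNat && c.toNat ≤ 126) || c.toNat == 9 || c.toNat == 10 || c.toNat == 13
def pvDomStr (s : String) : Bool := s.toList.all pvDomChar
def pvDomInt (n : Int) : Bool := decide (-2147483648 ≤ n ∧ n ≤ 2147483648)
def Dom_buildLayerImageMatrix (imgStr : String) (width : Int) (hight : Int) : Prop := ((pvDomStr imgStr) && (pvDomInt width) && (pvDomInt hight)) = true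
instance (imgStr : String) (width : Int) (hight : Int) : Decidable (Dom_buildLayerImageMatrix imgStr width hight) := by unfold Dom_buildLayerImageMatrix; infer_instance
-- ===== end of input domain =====

-- B replaces A's preallocated -1 matrix and triple loop with global index arithmetic by a single
-- streaming pass over the string: each character is converted once and grouped into rows and rows
-- into layers with accumulators, stopping once `layers` layers are built; objective: alternative.

-- int(c) for a single character c (shared helper; the default 0 is never reached under Pre_)
def pyIntChar (c : Char) : Int := (PySem.Int.ofChars? [c]).getD 0

-- ===== PORT A =====
def buildLayerImageMatrix (imgStr : String) (width : Int) (hight : Int) : List (List (List Int)) :=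
  let layers := PySem.Int.floordiv (PySem.Str.len imgStr) (width * hight)
  let img := (PySem.List.pyRange 0 layers 1).map (fun _z =>
     (PySem.List.pyRange 0 hight 1).map (fun _y =>
       (PySem.List.pyRange 0 width 1).map (fun _x => (-1 : Int))))
  (PySem.List.pyRange 0 layers 1).foldl (fun img l =>
    (PySem.List.pyRange 0 hight 1).foldl (fun img h =>
      (PySem.List.pyRange 0 width 1).foldl (fun img w =>
        let pos := l * width * hight + h * width + w
        img.modify l.toNat (fun lay => lay.modify h.toNat (fun row =>
          row.set w.toNat (pyIntChar ((PySem.Str.pyGet? imgStr pos).getD ' ')))))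
        img)
      img)
    img

-- ===== PORT B =====
-- the for-loop of Source B: state (img, layer, row); `break` = returning img when enough layers are built
def pvAltLoop (layers width hight : Int) : List Char → List (List (List Int)) → List (List Int) → List Int → List (List (List Int))
  | [], img, _, _ => img
  | c :: cs, img, layer, row =>
    if layers ≤ (img.length : Int) then img
    else if ((row.length + 1 : Nat) : Int) = width then
      (if ((layer.length + 1 : Nat) : Int) = hight then
        pvAltLoop layers width hight cs (img ++ [layer ++ [row ++ [pyIntChar c]]]) [] []
      else pvAltLoop layers width hight cs img (layer ++ [row ++ [pyIntChar c]]) [])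
    else pvAltLoop layers width hight cs img layer (row ++ [pyIntChar c])

def buildLayerImageMatrix_alt (imgStr : String) (width : Int) (hight : Int) : List (List (List Int)) :=
  let layers := PySem.Int.floordiv (PySem.Str.len imgStr) (width * hight)
  pvAltLoop layers width hight imgStr.toList [] [] []

-- ===== PRECONDITION & SPEC =====
-- Pre_ excludes exactly: width*hight == 0, where Python A raises ZeroDivisionError; inputs with a
-- non-digit character among the positions A accesses (the first layers*width*hight characters when
-- width and hight are positive), where Python A raises ValueError; and the corner where BOTH
-- dimensions are negative and the string holds at least width*hight characters, where A returns
-- `layers` copies of the empty layer without ever reading the string (an artefact of its empty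
-- inner range) while B's streaming parse reads the string and returns [] or raises ValueError.
def Pre_buildLayerImageMatrix (imgStr : String) (width : Int) (hight : Int) : Prop :=
  width * hight ≠ 0 ∧
  ¬ (width < 0 ∧ hight < 0 ∧ width * hight ≤ PySem.Str.len imgStr) ∧
  (0 < width → 0 < hight →
    (imgStr.toList.take (imgStr.toList.length / (width * hight).toNat * (width * hight).toNat)).all Char.isDigit = true)
instance (imgStr : String) (width : Int) (hight : Int) : Decidable (Pre_buildLayerImageMatrix imgStr width hight) := by unfold Pre_buildLayerImageMatrix; infer_instance

def pvWitness_buildLayerImageMatrix : String × Int × Int := ("123456789012", 3, 2)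

def Spec_buildLayerImageMatrix (imgStr : String) (width : Int) (hight : Int) (out : List (List (List Int))) : Prop := out = buildLayerImageMatrix_alt imgStr width hight
instance (imgStr : String) (width : Int) (hight : Int) (out : List (List (List Int))) : Decidable (Spec_buildLayerImageMatrix imgStr width hight out) := by unfold Spec_buildLayerImageMatrix; infer_instance

-- ===== CLAIM (what is proved, stated in full; the proofs are below) =====
def Claim_equal_buildLayerImageMatrix : Prop := ∀ (imgStr : String) (width : Int) (hight : Int), Dom_buildLayerImageMatrix imgStr width hight → Pre_buildLayerImageMatrix imgStr width hight → Spec_buildLayerImageMatrix imgStr width hight (buildLayerImageMatrix imgStr width hight)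

-- ===== LEMMAS AND PROOFS =====

-- the common row-major normal form both ports are reduced to
def pvC (imgStr : String) (width hight : Int) (L : Nat) : List (List (List Int)) :=
  (List.range L).map (fun (l : Nat) =>
    (List.range hight.toNat).map (fun (h : Nat) =>
      (List.range width.toNat).map (fun (w : Nat) =>
        pyIntChar ((PySem.Str.pyGet? imgStr ((l : Int) * width * hight + (h : Int) * width + (w : Int))).getD ' '))))

theorem pv_modify_modify {α : Type} (xs : List α) (l : Nat) (f g : α → α) :
    (xs.modify l f).modify l g = xs.modify l (fun y => g (f y)) := by
  apply List.ext_getElem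
  · simp
  · intro j h1 h2
    simp [List.getElem_modify]
    split_ifs <;> simp_all

theorem pv_foldl_modify_const {α β : Type} (G : β → α → α) (l : Nat) (r : List β) (xs : List α) :
    r.foldl (fun a i => (a.modify l (G i) : List α)) xs
      = xs.modify l (fun y => r.foldl (fun y i => G i y) y) := by
  induction r generalizing xs with
  | nil =>
      simp only [List.foldl_nil]
      apply List.ext_getElem
      · simp
      · intro j h1 h2; simp [List.getElem_modify]
  | cons b r ih =>
      simp only [List.foldl_cons]
      rw [ih, pv_modify_modify]

theorem pv_foldl_set_range {α : Type} (f : Nat → α) :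
    ∀ (n : Nat) (xs : List α), n ≤ xs.length →
      (List.range n).foldl (fun a i => a.set i (f i)) xs
        = (List.range n).map f ++ xs.drop n := by
  intro n
  induction n with
  | zero => simp
  | succ n ih =>
      intro xs hn
      rw [List.range_succ]
      simp only [List.foldl_append, List.foldl_cons, List.foldl_nil, List.map_append, List.map_cons, List.map_nil]
      rw [ih xs (by omega), List.set_append]
      have hmaplen : ((List.range n).map f).length = n := by simp
      rw [if_neg (by omega)]
      have hd : xs.drop n = xs[n] :: xs.drop (n+1) := List.drop_eq_getElem_cons (by omega)
      rw [hd, hmaplen, Nat.sub_self, List.set_cons_zero]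
      simp

theorem pv_foldl_modify_range {α : Type} [Inhabited α] (F : Nat → α → α) :
    ∀ (n : Nat) (xs : List α), n ≤ xs.length →
      (List.range n).foldl (fun a i => a.modify i (F i)) xs
        = (List.range n).map (fun i => F i (xs.getD i default)) ++ xs.drop n := by
  intro n
  induction n with
  | zero => simp
  | succ n ih =>
      intro xs hn
      rw [List.range_succ]
      simp only [List.foldl_append, List.foldl_cons, List.foldl_nil, List.map_append, List.map_cons, List.map_nil]
      rw [ih xs (by omega)]
      have hd : xs.drop n = xs[n] :: xs.drop (n+1) := List.drop_eq_getElem_cons (by omega)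
      rw [hd, List.modify_eq_set, List.set_append]
      have hmaplen : ((List.range n).map (fun i => F i (xs.getD i default))).length = n := by simp
      rw [hmaplen, Nat.sub_self]
      have hget : ((List.range n).map (fun i => F i (xs.getD i default)) ++ xs[n] :: xs.drop (n+1))[n]?.getD default = xs[n] := by
        rw [List.getElem?_append_right (by omega)]
        simp [List.getElem?_eq_getElem (show n < xs.length by omega)]
        rfl
      rw [hget]
      have hgd : xs.getD n default = xs[n] := by
        rw [List.getD_eq_getElem xs default (by omega)]
        rfl
      rw [List.set_cons_zero, hgd]
      simp

theorem pv_getD_map_range {α : Type} [Inhabited α] (g : Nat → α) (n i : Nat) (hi : i < n) :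
    ((List.range n).map g).getD i default = g i := by
  rw [List.getD_eq_getElem _ default (by simp [hi])]
  simp

theorem pv_drop_map_range {α : Type} (g : Nat → α) (n : Nat) : ((List.range n).map g).drop n = [] := by
  apply List.drop_eq_nil_of_le; simp

theorem pv_drop_take_eq_map_range {α : Type} [Inhabited α] (cs : List α) (A W : Nat) (h : A + W ≤ cs.length) :
    (cs.drop A).take W = (List.range W).map (fun k => cs.getD (A+k) default) := by
  apply List.ext_getElem
  · simp; omega
  · intro j h1 h2
    simp only [List.getElem_take, List.getElem_drop, List.getElem_map, List.getElem_range]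
    have hlt : A + j < cs.length := by simp at h1; omega
    rw [List.getD_eq_getElem cs default hlt]

-- A's preallocate-and-overwrite triple loop produces the normal form (any signs)
theorem pvA_eq_C (imgStr : String) (width hight : Int) :
    buildLayerImageMatrix imgStr width hight
      = pvC imgStr width hight (PySem.Int.floordiv (PySem.Str.len imgStr) (width*hight)).toNat := by
  unfold buildLayerImageMatrix
  simp only [PySem.List.pyRange_one, Int.sub_zero, List.foldl_map, List.map_map, zero_add,
    Int.toNat_natCast]
  simp only [pv_foldl_modify_const]
  rw [pv_foldl_modify_range _ _ _ (by simp)]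
  rw [pv_drop_map_range, List.append_nil]
  unfold pvC
  apply List.map_congr_left
  intro l hl
  rw [pv_getD_map_range _ _ _ (List.mem_range.mp hl)]
  simp only [Function.comp]
  rw [pv_foldl_modify_range _ _ _ (by simp)]
  rw [pv_drop_map_range, List.append_nil]
  apply List.map_congr_left
  intro h hhm
  rw [pv_getD_map_range _ _ _ (List.mem_range.mp hhm)]
  rw [pv_foldl_set_range _ _ _ (by simp)]
  simp only [Function.comp_apply]
  rw [pv_drop_map_range, List.append_nil]

-- definitional unfolding of one loop step
theorem pvAltLoop_cons (layers width hight : Int) (c : Char) (cs : List Char)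
    (img : List (List (List Int))) (layer : List (List Int)) (row : List Int) :
    pvAltLoop layers width hight (c :: cs) img layer row =
      (if layers ≤ (img.length : Int) then img
       else if ((row.length + 1 : Nat) : Int) = width then
         (if ((layer.length + 1 : Nat) : Int) = hight then
           pvAltLoop layers width hight cs (img ++ [layer ++ [row ++ [pyIntChar c]]]) [] []
         else pvAltLoop layers width hight cs img (layer ++ [row ++ [pyIntChar c]]) [])
       else pvAltLoop layers width hight cs img layer (row ++ [pyIntChar c])) := rfl

-- B's loop returns img unchanged as soon as enough layers are built (the `break`)
theorem pv_loop_done (layers width hight : Int) (cs : List Char) (img : List (List (List Int)))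
    (layer : List (List Int)) (row : List Int) (h : layers ≤ (img.length : Int)) :
    pvAltLoop layers width hight cs img layer row = img := by
  cases cs with
  | nil => rfl
  | cons c cs => rw [pvAltLoop_cons, if_pos h]

-- consuming one full row: the next width - row.length characters extend row to a complete row
theorem pv_loop_row (layers width hight : Int) (hw : 0 < width) :
    ∀ (cs rest : List Char) (img : List (List (List Int))) (layer : List (List Int)) (row : List Int),
      (img.length : Int) < layers → cs ≠ [] → cs.length + row.length = width.toNat →
      pvAltLoop layers width hight (cs ++ rest) img layer row =
        (if ((layer.length + 1 : Nat) : Int) = hight then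
          pvAltLoop layers width hight rest (img ++ [layer ++ [row ++ cs.map pyIntChar]]) [] []
        else pvAltLoop layers width hight rest img (layer ++ [row ++ cs.map pyIntChar]) []) := by
  intro cs
  induction cs with
  | nil => intro rest img layer row _ hne _; exact absurd rfl hne
  | cons c cs ih =>
      intro rest img layer row himg _ hlen
      rw [List.cons_append, pvAltLoop_cons, if_neg (by omega)]
      cases cs with
      | nil =>
          have hweq : ((row.length + 1 : Nat) : Int) = width := by
            simp at hlen; omega
          rw [if_pos hweq]
          simp
      | cons c' cs' =>
          have hwne : ¬ ((row.length + 1 : Nat) : Int) = width := by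
            simp at hlen; omega
          rw [if_neg hwne]
          rw [ih rest img layer (row ++ [pyIntChar c]) himg (by simp) (by simp at hlen ⊢; omega)]
          simp

-- consuming one full layer: h complete rows of width characters each
theorem pv_loop_layer (layers width hight : Int) (hw : 0 < width) :
    ∀ (h : Nat) (cs rest : List Char) (img : List (List (List Int))) (layer : List (List Int)),
      (img.length : Int) < layers → 0 < h → layer.length + h = hight.toNat → cs.length = h * width.toNat →
      pvAltLoop layers width hight (cs ++ rest) img layer [] =
        pvAltLoop layers width hight rest
          (img ++ [layer ++ (List.range h).map (fun i => ((cs.drop (i * width.toNat)).take width.toNat).map pyIntChar)]) [] [] := by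
  intro h
  induction h with
  | zero => intro _ _ _ _ _ h0 _ _; omega
  | succ h ih =>
      intro cs rest img layer himg _ hlay hlen
      by_cases hz : h = 0
      · subst hz
        have hne : cs ≠ [] := by
          intro hnil; rw [hnil] at hlen; simp at hlen; omega
        rw [pv_loop_row layers width hight hw cs rest img layer [] himg hne (by simpa using hlen)]
        rw [if_pos (by omega)]
        have htake : cs.take width.toNat = cs := List.take_of_length_le (by omega)
        simp only [List.nil_append, Nat.zero_add, List.range_one, List.map_cons, List.map_nil, Nat.zero_mul, List.drop_zero, htake]
      · have hW : 0 < width.toNat := by omega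
        have hcs : cs = cs.take width.toNat ++ cs.drop width.toNat := (List.take_append_drop _ cs).symm
        have hlen1 : (cs.take width.toNat).length = width.toNat := by
          rw [List.length_take]
          have : width.toNat ≤ cs.length := by
            rw [hlen]; nlinarith
          omega
        have hne1 : cs.take width.toNat ≠ [] := by
          intro hnil; rw [hnil] at hlen1; simp at hlen1; omega
        conv_lhs => rw [hcs, List.append_assoc]
        rw [pv_loop_row layers width hight hw (cs.take width.toNat) (cs.drop width.toNat ++ rest)
              img layer [] himg hne1 (by simpa using hlen1)]
        rw [if_neg (by omega)]
        simp only [List.nil_append]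
        rw [ih (cs.drop width.toNat) rest img (layer ++ [(cs.take width.toNat).map pyIntChar])
              himg (by omega) (by simp; omega) (by rw [List.length_drop, hlen, Nat.succ_mul]; omega)]
        congr 2
        rw [List.append_assoc]
        congr 1
        rw [List.range_succ_eq_map]
        simp only [List.map_cons, List.map_map, Nat.zero_mul, List.drop_zero, List.singleton_append]
        have htail : List.map (fun i => List.map pyIntChar (List.take width.toNat (List.drop (i * width.toNat) (List.drop width.toNat cs)))) (List.range h)
            = List.map ((fun i => List.map pyIntChar (List.take width.toNat (List.drop (i * width.toNat) cs))) ∘ Nat.succ) (List.range h) := by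
          apply List.map_congr_left
          intro i _
          simp only [Function.comp_apply]
          rw [List.drop_drop]
          congr 3
          rw [Nat.succ_eq_add_one]
          ring
        rw [htail]

-- consuming l full layers starting from empty row/layer accumulators
theorem pv_loop_top (layers width hight : Int) (hw : 0 < width) (hh : 0 < hight) :
    ∀ (l : Nat) (cs : List Char) (img : List (List (List Int))),
      (img.length : Int) + l = layers → l * (hight.toNat * width.toNat) ≤ cs.length →
      pvAltLoop layers width hight cs img [] [] =
        img ++ (List.range l).map (fun i =>
          (List.range hight.toNat).map (fun h =>
            ((cs.drop (i * (hight.toNat * width.toNat) + h * width.toNat)).take width.toNat).map pyIntChar)) := by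
  intro l
  induction l with
  | zero =>
      intro cs img hlay _
      rw [pv_loop_done layers width hight cs img [] [] (by omega)]
      simp
  | succ l ih =>
      intro cs img hlay hlen
      have hH : 0 < hight.toNat := by omega
      have hW : 0 < width.toNat := by omega
      have hszle : hight.toNat * width.toNat ≤ cs.length := by nlinarith
      have hcs : cs = cs.take (hight.toNat * width.toNat) ++ cs.drop (hight.toNat * width.toNat) :=
        (List.take_append_drop _ cs).symm
      have hlen1 : (cs.take (hight.toNat * width.toNat)).length = hight.toNat * width.toNat := by
        rw [List.length_take]; omega
      conv_lhs => rw [hcs]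
      rw [pv_loop_layer layers width hight hw hight.toNat (cs.take (hight.toNat * width.toNat))
            (cs.drop (hight.toNat * width.toNat)) img [] (by omega) hH (by simp) (by rw [hlen1])]
      rw [ih (cs.drop (hight.toNat * width.toNat)) _ (by simp; omega)
            (by rw [List.length_drop]; rw [Nat.succ_mul] at hlen; omega)]
      rw [List.append_assoc]
      congr 1
      rw [List.range_succ_eq_map]
      simp only [List.map_cons, List.map_map, List.singleton_append, List.nil_append]
      congr 1
      · apply List.map_congr_left
        intro h hhm
        have hhH : h < hight.toNat := List.mem_range.mp hhm
        simp only [Nat.zero_mul, Nat.zero_add]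
        congr 1
        rw [List.drop_take]
        rw [List.take_take]
        congr 1
        have : width.toNat ≤ hight.toNat * width.toNat - h * width.toNat := by
          have := Nat.succ_le_of_lt hhH
          calc width.toNat = 1 * width.toNat := by ring
          _ ≤ (hight.toNat - h) * width.toNat := Nat.mul_le_mul_right _ (by omega)
          _ = hight.toNat * width.toNat - h * width.toNat := by rw [Nat.sub_mul]
        omega
      · apply List.map_congr_left
        intro i _
        simp only [Function.comp_apply]
        apply List.map_congr_left
        intro h _
        congr 2
        rw [List.drop_drop]
        congr 1
        rw [Nat.succ_eq_add_one]
        ring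

-- B's streaming pass produces the same normal form when width and hight are positive
theorem pvB_eq_C_pos (imgStr : String) (width hight : Int) (hw : 0 < width) (hh : 0 < hight) :
    buildLayerImageMatrix_alt imgStr width hight
      = pvC imgStr width hight (PySem.Int.floordiv (PySem.Str.len imgStr) (width*hight)).toNat := by
  have hsp : 0 < width * hight := by positivity
  have hlen : PySem.Str.len imgStr = (imgStr.toList.length : Int) := PySem.Str.len_eq imgStr
  set cs := imgStr.toList with hcsdef
  set n : Int := (cs.length : Int) with hn
  set L : Int := PySem.Int.floordiv n (width * hight) with hL
  have hL0 : 0 ≤ L := by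
    rw [hL, PySem.Int.floordiv_eq_ediv_of_pos hsp]
    exact Int.ediv_nonneg (by positivity) (by omega)
  have hm0 : 0 ≤ PySem.Int.mod n (width * hight) := PySem.Int.mod_nonneg _ hsp
  have hLmul : L * (width * hight) ≤ n := by
    have := PySem.Int.floordiv_mul_add_mod n (width * hight)
    rw [hL]; omega
  have hWc : ((width.toNat : Int)) = width := Int.toNat_of_nonneg (le_of_lt hw)
  have hHc : ((hight.toNat : Int)) = hight := Int.toNat_of_nonneg (le_of_lt hh)
  have hLc : ((L.toNat : Int)) = L := Int.toNat_of_nonneg hL0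
  have hbound : L.toNat * (hight.toNat * width.toNat) ≤ cs.length := by
    have hc : ((L.toNat * (hight.toNat * width.toNat) : Nat) : Int) ≤ (cs.length : Int) := by
      push_cast
      rw [hWc, hHc, hLc]
      calc L * (hight * width) = L * (width * hight) := by ring
        _ ≤ n := hLmul
    exact_mod_cast hc
  unfold buildLayerImageMatrix_alt
  show pvAltLoop L width hight cs [] [] [] = pvC imgStr width hight L.toNat
  rw [pv_loop_top L width hight hw hh L.toNat cs [] (by simpa using hLc) hbound]
  unfold pvC
  simp only [List.nil_append]
  apply List.map_congr_left
  intro l hl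
  have hlL : l < L.toNat := List.mem_range.mp hl
  apply List.map_congr_left
  intro h hhm
  have hhH : h < hight.toNat := List.mem_range.mp hhm
  have hAb : (l * (hight.toNat * width.toNat) + h * width.toNat) + width.toNat ≤ cs.length := by
    have h1 : (l * (hight.toNat * width.toNat) + h * width.toNat) + width.toNat
        ≤ (l + 1) * (hight.toNat * width.toNat) := by
      have h2 : h * width.toNat + width.toNat ≤ hight.toNat * width.toNat := by
        calc h * width.toNat + width.toNat = (h + 1) * width.toNat := by ring
          _ ≤ hight.toNat * width.toNat := Nat.mul_le_mul_right _ (by omega)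
      calc (l * (hight.toNat * width.toNat) + h * width.toNat) + width.toNat
          = l * (hight.toNat * width.toNat) + (h * width.toNat + width.toNat) := by ring
        _ ≤ l * (hight.toNat * width.toNat) + hight.toNat * width.toNat := by omega
        _ = (l + 1) * (hight.toNat * width.toNat) := by ring
    have h3 : (l + 1) * (hight.toNat * width.toNat) ≤ L.toNat * (hight.toNat * width.toNat) :=
      Nat.mul_le_mul_right _ (by omega)
    omega
  rw [pv_drop_take_eq_map_range cs _ _ hAb, List.map_map]
  apply List.map_congr_left
  intro w hwm
  have hwW : w < width.toNat := List.mem_range.mp hwm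
  simp only [Function.comp_apply]
  have hplt : l * (hight.toNat * width.toNat) + h * width.toNat + w < cs.length := by omega
  have hpos : (l : Int) * width * hight + (h : Int) * width + (w : Int)
      = ((l * (hight.toNat * width.toNat) + h * width.toNat + w : Nat) : Int) := by
    push_cast
    rw [hWc, hHc]
    ring
  have hg : PySem.Str.pyGet? imgStr ((l : Int) * width * hight + (h : Int) * width + (w : Int))
      = some (cs[l * (hight.toNat * width.toNat) + h * width.toNat + w]) := by
    rw [hpos]
    show PySem.List.pyGet? cs _ = _
    rw [PySem.List.pyGet?_natCast, List.getElem?_eq_getElem hplt]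
  rw [hg]
  simp only [Option.getD_some]
  rw [List.getD_eq_getElem cs default hplt]

-- ===== VERDICT (by name: the statement is the Claim_ definition above) =====
theorem buildLayerImageMatrix_spec : Claim_equal_buildLayerImageMatrix := by
  intro imgStr width hight _hdom hpre
  unfold Spec_buildLayerImageMatrix
  obtain ⟨hsz, hneg, -⟩ := hpre
  rw [pvA_eq_C]
  set L : Int := PySem.Int.floordiv (PySem.Str.len imgStr) (width * hight) with hL
  by_cases hL0 : L ≤ 0
  · have hC : pvC imgStr width hight L.toNat = [] := by
      rw [Int.toNat_of_nonpos hL0]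
      unfold pvC
      simp
    rw [hC]
    symm
    unfold buildLayerImageMatrix_alt
    show pvAltLoop L width hight imgStr.toList [] [] [] = []
    exact pv_loop_done L width hight imgStr.toList [] [] [] (by simpa using hL0)
  · rw [Int.not_le] at hL0
    have hn0 : (0 : Int) ≤ PySem.Str.len imgStr := by rw [PySem.Str.len_eq]; positivity
    have hsp : 0 < width * hight := by
      rcases lt_trichotomy (width * hight) 0 with hlt | heq | hgt
      · exfalso
        have hLle : L ≤ 0 := by
          rw [hL]
          show Int.fdiv (PySem.Str.len imgStr) (width * hight) ≤ 0
          rw [Int.fdiv_eq_ediv]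
          have := Int.ediv_nonpos_of_nonneg_of_nonpos hn0 (show width * hight ≤ 0 by omega)
          split_ifs <;> omega
        omega
      · exact absurd heq hsz
      · exact hgt
    have hm0 : 0 ≤ PySem.Int.mod (PySem.Str.len imgStr) (width * hight) := PySem.Int.mod_nonneg _ hsp
    have hnge : width * hight ≤ PySem.Str.len imgStr := by
      have hdm := PySem.Int.floordiv_mul_add_mod (PySem.Str.len imgStr) (width * hight)
      rw [← hL] at hdm
      nlinarith
    have hw : 0 < width := by
      rcases lt_trichotomy width 0 with hwl | hwe | hwg
      · exfalso
        have hhl : hight < 0 := by nlinarith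
        exact hneg ⟨hwl, hhl, hnge⟩
      · exfalso; rw [hwe] at hsp; simp at hsp
      · exact hwg
    have hh : 0 < hight := by nlinarith
    rw [hL]
    exact (pvB_eq_C_pos imgStr width hight hw hh).symm
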